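-- pv_equiv track=rewrite | github.com/ttzytt/PyAutoGrade | tests/ex2/tested_code/11/Unit 1/Cards/card_functions_review_1.py | deal_n_hands
-- ===== SOURCE A (Python) =====
-- def deal_n_hands(deck, hands):
--     table_hands = []
--     for hand in range(hands):
--         hand_list = []
--         for i in range(len(deck)):
--             if i % hands == hand:
--                 hand_list.append(deck[i])
--         table_hands.append(hand_list)
--     return table_hands
-- ===== SOURCE B (Python) =====
-- def deal_n_hands(deck, hands):
--     # pile h is the strided slice h, h+hands, h+2*hands, ... -- no inner scan, no modulo test
--     return [deck[h::hands] for h in range(hands)]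
-- ===== Notes on version B (the rewrite author's own statement) =====
-- stated objective: idiomatic
-- what changed: Replaces the nested scan (for each hand, scan every deck index and test i % hands == hand) with one strided slice deck[h::hands] per hand, so there is no inner loop and no modulo arithmetic.
import Mathlib
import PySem

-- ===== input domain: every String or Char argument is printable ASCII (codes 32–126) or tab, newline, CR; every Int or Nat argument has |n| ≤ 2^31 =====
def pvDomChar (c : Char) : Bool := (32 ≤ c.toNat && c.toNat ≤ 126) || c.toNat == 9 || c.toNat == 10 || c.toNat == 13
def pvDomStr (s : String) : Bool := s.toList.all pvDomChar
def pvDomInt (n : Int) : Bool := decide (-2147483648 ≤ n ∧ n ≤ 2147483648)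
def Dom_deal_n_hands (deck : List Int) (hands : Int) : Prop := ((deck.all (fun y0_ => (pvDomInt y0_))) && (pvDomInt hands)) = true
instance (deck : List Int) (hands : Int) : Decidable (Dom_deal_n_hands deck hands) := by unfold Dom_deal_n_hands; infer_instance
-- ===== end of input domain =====

-- B deals each pile as one strided slice deck[h::hands] instead of A's inner scan of every index
-- with an `i % hands == hand` test; return values agree on all inputs (both return [] for hands ≤ 0).

-- ===== PORT A =====
-- inner loop: 'for i in range(len(deck)): if i % hands == hand: hand_list.append(deck[i])';
-- i is always a valid index, so deck[i] is pyGetD with an unused default.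
def deal_n_hands (deck : List Int) (hands : Int) : List (List Int) :=
  (PySem.List.pyRange 0 hands).foldl
    (fun table_hands hand =>
      table_hands ++
        [(PySem.List.pyRange 0 (deck.length : Int)).foldl
          (fun hand_list i =>
            if PySem.Int.mod i hands == hand then hand_list ++ [PySem.List.pyGetD deck i 0]
            else hand_list) []])
    []

-- ===== PORT B =====
-- '[deck[h::hands] for h in range(hands)]'; the slice step is h's range bound hands, which is
-- nonzero whenever the comprehension body runs, so slice? is always some and getD [] is unused.
def deal_n_hands_alt (deck : List Int) (hands : Int) : List (List Int) :=
  (PySem.List.pyRange 0 hands).map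
    (fun h => (PySem.List.slice? deck (some h) none hands).getD [])

-- ===== PRECONDITION & SPEC =====
def Spec_deal_n_hands (deck : List Int) (hands : Int) (out : List (List Int)) : Prop := out = deal_n_hands_alt deck hands
instance (deck : List Int) (hands : Int) (out : List (List Int)) : Decidable (Spec_deal_n_hands deck hands out) := by unfold Spec_deal_n_hands; infer_instance

-- ===== CLAIM (what is proved, stated in full; the proofs are below) =====
def Claim_equal_deal_n_hands : Prop := ∀ (deck : List Int) (hands : Int), Dom_deal_n_hands deck hands → Spec_deal_n_hands deck hands (deal_n_hands deck hands)

-- ===== LEMMAS AND PROOFS =====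

-- Python's slice deck[hn::s] (0 < s, 0 ≤ hn), computed from PySem's sliceIndices, is the
-- strided filterMap over indices hn, hn+s, hn+2s, … below deck.length.
lemma slice_pos_step (deck : List Int) (hn s : Nat) (hs : 0 < s) :
    PySem.List.slice? deck (some (hn:Int)) none (s:Int) =
      some (if hn < deck.length then
        (List.range ((deck.length - hn + (s-1))/s)).filterMap (fun k => deck[(hn + s*k)]?)
      else []) := by
  have hs' : (s:Int) ≠ 0 := by exact_mod_cast hs.ne'
  have h1 : ¬ ((s:Int) < 0) := by simp
  have h2 : ¬ ((hn:Int) < 0) := by simp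
  have hsp : (0:Int) < s := by exact_mod_cast hs
  simp only [PySem.List.slice?, PySem.List.sliceIndices, if_neg hs', if_neg h1, if_neg h2,
    if_pos hsp]
  set n := deck.length with hn_def
  by_cases h : hn < n
  · have hlt : ((hn:Int) < (n:Int)) := by exact_mod_cast h
    rw [min_eq_left hlt.le, if_pos hlt, if_pos h]
    have hcast : ((n:Int) - hn + s - 1) = ((n - hn + (s-1) : Nat) : Int) := by push_cast; omega
    rw [hcast, ← Int.natCast_div, Int.toNat_natCast]
    refine congrArg some (List.filterMap_congr ?_)
    intro k hk
    have hidx : ((hn:Int) + s * k) = ((hn + s*k : Nat) : Int) := by push_cast; ring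
    rw [hidx, Int.toNat_natCast]
  · have hlt : ¬ ((hn:Int) < (n:Int)) := by exact_mod_cast h
    rw [min_eq_right (by omega : (n:Int) ≤ hn), if_neg (lt_irrefl (n:Int)), if_neg h]
    simp

-- The indices of range n whose residue mod s is h are exactly h, h+s, h+2s, … below n.
lemma filter_range_mod (n h s : Nat) (hh : h < s) :
    (List.range n).filter (fun i => i % s == h) = List.range' h ((n - h + (s-1))/s) s := by
  induction n with
  | zero =>
    have : (s-1)/s = 0 := Nat.div_eq_of_lt (by omega)
    simp [this]
  | succ n ih =>
    rw [List.range_succ, List.filter_append, ih]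
    by_cases hm : n % s = h
    · have hdm := Nat.div_add_mod n s
      have hnh : h ≤ n := hm ▸ Nat.mod_le n s
      obtain ⟨q, hq⟩ : ∃ q, n - h = s * q := ⟨n / s, by omega⟩
      have e1 : n - h + (s-1) = (s - 1) + s * q := by omega
      have e2 : n + 1 - h + (s-1) = s + s * q := by omega
      have d1 : (n - h + (s-1))/s = q := by
        rw [e1, Nat.add_mul_div_left _ _ (by omega : 0 < s), Nat.div_eq_of_lt (by omega)]
        omega
      have d2 : (n + 1 - h + (s-1))/s = q + 1 := by
        rw [e2, Nat.add_mul_div_left _ _ (by omega : 0 < s), Nat.div_self (by omega)]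
        omega
      rw [d1, d2, List.range'_concat]
      simp [hm, show h + s * q = n by omega]
    · have d : (n + 1 - h + (s-1))/s = (n - h + (s-1))/s := by
        by_cases hnh : h ≤ n
        · have hdm := Nat.div_add_mod (n - h) s
          have hrlt : (n - h) % s < s := Nat.mod_lt _ (by omega)
          set q := (n - h) / s with hq
          set r := (n - h) % s with hr
          have hr0 : r ≠ 0 := by
            intro h0
            apply hm
            have hn' : n = h + s * q := by omega
            rw [hn', Nat.add_mul_mod_self_left, Nat.mod_eq_of_lt hh]
          have hsq : s * (q + 1) = s * q + s := by ring
          have e1 : n - h + (s-1) = (r - 1) + s * (q + 1) := by omega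
          have e2 : n + 1 - h + (s-1) = r + s * (q + 1) := by omega
          rw [e1, e2, Nat.add_mul_div_left _ _ (by omega : 0 < s),
              Nat.add_mul_div_left _ _ (by omega : 0 < s),
              Nat.div_eq_of_lt (by omega), Nat.div_eq_of_lt (by omega)]
        · rw [Nat.div_eq_of_lt (by omega), Nat.div_eq_of_lt (by omega)]
      rw [d]
      simp [hm]

lemma range'_eq_map_range_mul (a n st : Nat) :
    List.range' a n st = (List.range n).map (fun k => a + st*k) := by
  induction n with
  | zero => simp
  | succ n ih => rw [List.range'_concat, List.range_succ, List.map_append, ih]; simp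

lemma filterMap_eq_map_of_mem {α β : Type} {l : List α} {g : α → Option β} {f : α → β}
    (h : ∀ x ∈ l, g x = some (f x)) : l.filterMap g = l.map f := by
  induction l with
  | nil => rfl
  | cons x t ih =>
    rw [List.filterMap_cons, h x List.mem_cons_self, List.map_cons,
      ih (fun y hy => h y (List.mem_cons_of_mem x hy))]

-- A's inner scan for one hand equals B's slice deck[hn::s].
lemma hand_pile (deck : List Int) (s hn : Nat) (hs : 0 < s) (hh : hn < s) :
    (PySem.List.pyRange 0 (deck.length : Int)).foldl
      (fun hand_list i =>
        if PySem.Int.mod i (s:Int) == (hn:Int) then hand_list ++ [PySem.List.pyGetD deck i 0]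
        else hand_list) []
    = (PySem.List.slice? deck (some (hn:Int)) none (s:Int)).getD [] := by
  set n := deck.length with hn_def
  rw [PySem.List.foldl_append_if, PySem.List.pyRange_zero_natCast, List.filter_map,
    List.map_map, slice_pos_step deck hn s hs, Option.getD_some, List.nil_append]
  simp only [Function.comp_def]
  have hp : (fun k : Nat => PySem.Int.mod (k:Int) (s:Int) == (hn:Int)) = fun k => k % s == hn := by
    funext k
    simp only [PySem.Int.mod_natCast]
    simp
    omega
  rw [hp, filter_range_mod n hn s hh, range'_eq_map_range_mul, List.map_map]
  by_cases h : hn < n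
  · rw [if_pos h]
    have hbound : ∀ k ∈ List.range ((n - hn + (s-1))/s), hn + s*k < n := by
      intro k hk
      rw [List.mem_range] at hk
      have h1 : ((n - hn + (s-1))/s) * s ≤ n - hn + (s-1) := Nat.div_mul_le_self _ _
      have h2 : (k+1)*s ≤ ((n - hn + (s-1))/s)*s := Nat.mul_le_mul_right _ (by omega)
      have h3 : (k+1)*s = k*s + s := by ring
      have h4 : s*k = k*s := by ring
      omega
    rw [filterMap_eq_map_of_mem (f := fun k => deck.getD (hn + s*k) 0)
      (fun k hk => by simp [List.getElem?_eq_getElem (hbound k hk)])]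
    apply List.map_congr_left
    intro k _
    simp [PySem.List.pyGetD_natCast]
  · rw [if_neg h]
    have : (n - hn + (s-1))/s = 0 := by
      have : n - hn = 0 := by omega
      rw [this, Nat.zero_add, Nat.div_eq_of_lt (by omega)]
    rw [this]
    simp

-- ===== VERDICT (by name: the statement is the Claim_ definition above) =====
theorem deal_n_hands_spec : Claim_equal_deal_n_hands := by
  intro deck hands _
  unfold Spec_deal_n_hands deal_n_hands deal_n_hands_alt
  rw [PySem.List.foldl_append_singleton_eq_map, List.nil_append]
  apply List.map_congr_left
  intro hand hmem
  rw [PySem.List.mem_pyRange_one] at hmem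
  obtain ⟨hl, hr⟩ := hmem
  have hhand : ((hand.toNat : Nat) : Int) = hand := Int.toNat_of_nonneg hl
  have hhands : ((hands.toNat : Nat) : Int) = hands := Int.toNat_of_nonneg (by omega)
  rw [← hhand, ← hhands]
  exact hand_pile deck hands.toNat hand.toNat (by omega) (by omega)
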